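-- pv_equiv track=rewrite | github.com/Mohit4022-cloud/EmailDJ | hub-api/email_generation/generation_plan.py | _select_hook_fact
-- ===== SOURCE A (Python) =====
-- from typing import Any
--
-- def _select_hook_fact(fact_entries: list[dict[str, Any]]) -> dict[str, Any] | None:
--     if not fact_entries:
--         return None
--     for band in ("direct_evidence", "strong_signal", "weak_signal", "contextual_inference"):
--         for entry in fact_entries:
--             if entry.get("evidence_band") == band:
--                 return entry
--     return fact_entries[0]
-- ===== SOURCE B (Python) =====
-- _PRIORITY = {
--     "direct_evidence": 0,
--     "strong_signal": 1,
--     "weak_signal": 2,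
--     "contextual_inference": 3,
-- }
--
-- def _select_hook_fact(fact_entries):
--     if not fact_entries:
--         return None
--     best = None
--     best_rank = 4
--     for entry in fact_entries:
--         rank = _PRIORITY.get(entry.get("evidence_band"), 4)
--         if rank < best_rank:
--             best, best_rank = entry, rank
--     return best if best is not None else fact_entries[0]
-- ===== Notes on version B (the rewrite author's own statement) =====
-- stated objective: alternative
-- what changed: Replaced the band-by-band rescan of the whole list (up to 4 passes with early return) with a single fold that keeps the entry of strictly smallest band rank, updating only on strict improvement so the first entry wins ties.
import Mathlib
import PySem

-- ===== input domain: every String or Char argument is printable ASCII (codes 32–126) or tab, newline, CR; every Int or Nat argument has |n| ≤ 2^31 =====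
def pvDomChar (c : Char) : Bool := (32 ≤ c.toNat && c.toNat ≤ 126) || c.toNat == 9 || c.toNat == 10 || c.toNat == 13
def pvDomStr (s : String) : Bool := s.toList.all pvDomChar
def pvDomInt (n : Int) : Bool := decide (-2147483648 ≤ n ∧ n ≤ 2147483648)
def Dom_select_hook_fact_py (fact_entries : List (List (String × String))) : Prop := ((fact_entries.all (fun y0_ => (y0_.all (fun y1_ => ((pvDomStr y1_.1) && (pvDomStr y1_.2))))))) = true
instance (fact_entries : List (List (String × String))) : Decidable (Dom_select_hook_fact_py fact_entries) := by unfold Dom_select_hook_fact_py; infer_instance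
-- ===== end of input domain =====

-- B replaces A's band-by-band rescans of the list (one per evidence band) by a single pass
-- that keeps the entry of strictly smallest band rank (first entry wins ties).

-- shared port of Python's dict.get on an association list (first match)
def pyDictGet (e : List (String × String)) (k : String) : Option String :=
  (e.find? (fun p => p.1 == k)).map (·.2)

-- ===== PORT A =====
-- inner 'for entry in fact_entries' loop of A (early return on match)
def aInner (band : String) : List (List (String × String)) → Option (List (String × String))
  | [] => none
  | e :: rest => if pyDictGet e "evidence_band" == some band then some e else aInner band rest

-- outer 'for band in (…)' loop of A
def aOuter (fe : List (List (String × String))) : List String → Option (List (String × String))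
  | [] => none
  | b :: bs =>
    match aInner b fe with
    | some e => some e
    | none => aOuter fe bs

def select_hook_fact_py (fact_entries : List (List (String × String))) : Option (List (String × String)) :=
  if fact_entries.isEmpty then none
  else
    match aOuter fact_entries ["direct_evidence", "strong_signal", "weak_signal", "contextual_inference"] with
    | some e => some e
    | none => fact_entries.head?

-- ===== PORT B =====
-- the _PRIORITY dict of Source B
def bPriority : List (String × Nat) :=
  [("direct_evidence", 0), ("strong_signal", 1), ("weak_signal", 2), ("contextual_inference", 3)]

-- _PRIORITY.get(entry.get("evidence_band"), 4)
def bRank (e : List (String × String)) : Nat :=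
  match pyDictGet e "evidence_band" with
  | some band => ((bPriority.find? (fun p => p.1 == band)).map (·.2)).getD 4
  | none => 4

-- the loop body of Source B
def bStep (st : Option (List (String × String)) × Nat) (e : List (String × String)) :
    Option (List (String × String)) × Nat :=
  if bRank e < st.2 then (some e, bRank e) else st

def select_hook_fact_py_alt (fact_entries : List (List (String × String))) : Option (List (String × String)) :=
  if fact_entries.isEmpty then none
  else
    match (fact_entries.foldl bStep (none, 4)).1 with
    | some e => some e
    | none => fact_entries.head?

-- ===== PRECONDITION & SPEC =====
def Spec_select_hook_fact_py (fact_entries : List (List (String × String))) (out : Option (List (String × String))) : Prop := out = select_hook_fact_py_alt fact_entries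
instance (fact_entries : List (List (String × String))) (out : Option (List (String × String))) : Decidable (Spec_select_hook_fact_py fact_entries out) := by unfold Spec_select_hook_fact_py; infer_instance

-- ===== CLAIM (what is proved, stated in full; the proofs are below) =====
def Claim_equal_select_hook_fact_py : Prop := ∀ (fact_entries : List (List (String × String))), Dom_select_hook_fact_py fact_entries → Spec_select_hook_fact_py fact_entries (select_hook_fact_py fact_entries)

-- ===== LEMMAS AND PROOFS =====

-- chained first-match scans over a list of ranks (canonical form of A's nested loops)
def chainAux (l : List (List (String × String))) : List Nat → Option (List (String × String))
  | [] => none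
  | i :: is =>
    match l.find? (fun e => bRank e == i) with
    | some e => some e
    | none => chainAux l is

theorem bRank_eq (e : List (String × String)) :
    bRank e =
      if pyDictGet e "evidence_band" = some "direct_evidence" then 0
      else if pyDictGet e "evidence_band" = some "strong_signal" then 1
      else if pyDictGet e "evidence_band" = some "weak_signal" then 2
      else if pyDictGet e "evidence_band" = some "contextual_inference" then 3
      else 4 := by
  unfold bRank
  cases hg : pyDictGet e "evidence_band" with
  | none => simp
  | some b =>
    simp only [Option.some.injEq]
    by_cases h0 : b = "direct_evidence"
    · subst h0; simp [bPriority]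
    · by_cases h1 : b = "strong_signal"
      · subst h1; simp [bPriority, List.find?]
      · by_cases h2 : b = "weak_signal"
        · subst h2; simp [bPriority, List.find?]
        · by_cases h3 : b = "contextual_inference"
          · subst h3; simp [bPriority, List.find?]
          · have c0 : ("direct_evidence" == b) = false :=
              beq_eq_false_iff_ne.mpr (fun h => h0 h.symm)
            have c1 : ("strong_signal" == b) = false :=
              beq_eq_false_iff_ne.mpr (fun h => h1 h.symm)
            have c2 : ("weak_signal" == b) = false :=
              beq_eq_false_iff_ne.mpr (fun h => h2 h.symm)
            have c3 : ("contextual_inference" == b) = false :=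
              beq_eq_false_iff_ne.mpr (fun h => h3 h.symm)
            simp [bPriority, List.find?, c0, c1, c2, c3, h0, h1, h2, h3]

theorem rank_eq_band (e : List (String × String)) (band : String) (i : Nat)
    (h : (band, i) ∈ bPriority) :
    (pyDictGet e "evidence_band" == some band) = (bRank e == i) := by
  rw [bRank_eq]
  fin_cases h <;> split_ifs <;> simp_all

theorem aInner_eq_find (band : String) (i : Nat) (h : (band, i) ∈ bPriority) :
    ∀ l, aInner band l = l.find? (fun e => bRank e == i) := by
  intro l
  induction l with
  | nil => rfl
  | cons e t ih =>
    have hc := rank_eq_band e band i h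
    simp only [aInner, List.find?_cons, hc, ih]
    cases bRank e == i <;> simp

theorem chainAux_nil (is : List Nat) : chainAux [] is = none := by
  induction is with
  | nil => rfl
  | cons i is ih => simp [chainAux, ih]

theorem chainAux_append (l : List (List (String × String))) (is js : List Nat) :
    chainAux l (is ++ js) = (chainAux l is).or (chainAux l js) := by
  induction is with
  | nil => simp [chainAux]
  | cons i is ih =>
    simp only [List.cons_append, chainAux, ih]
    cases l.find? (fun e => bRank e == i) <;> simp

theorem chainAux_skip (e : List (String × String)) (t : List (List (String × String)))
    (is : List Nat) (h : ∀ i ∈ is, bRank e ≠ i) :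
    chainAux (e :: t) is = chainAux t is := by
  induction is with
  | nil => rfl
  | cons i is ih =>
    have hne : (bRank e == i) = false := beq_eq_false_iff_ne.mpr (h i (by simp))
    simp only [chainAux, List.find?_cons, hne]
    rw [ih (fun j hj => h j (by simp [hj]))]

theorem fold_eq (l : List (List (String × String))) :
    ∀ (b : Option (List (String × String))) (r : Nat),
    l.foldl bStep (b, r) =
      match chainAux l (List.range r) with
      | some e => (some e, bRank e)
      | none => (b, r) := by
  induction l with
  | nil => intro b r; simp [chainAux_nil]
  | cons e t ih =>
    intro b r
    simp only [List.foldl_cons, bStep]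
    by_cases hk : bRank e < r
    · rw [if_pos hk]
      rw [ih (some e) (bRank e)]
      -- decompose range r around bRank e
      have hsplit : List.range r
          = (List.range (bRank e) ++ [bRank e]) ++
            (List.range (r - (bRank e + 1))).map (fun j => (bRank e + 1) + j) := by
        have : r = (bRank e + 1) + (r - (bRank e + 1)) := by omega
        rw [← List.range_succ]
        conv_lhs => rw [this]
        rw [List.range_add]
      rw [hsplit, chainAux_append, chainAux_append]
      have hskip : chainAux (e :: t) (List.range (bRank e)) = chainAux t (List.range (bRank e)) := by
        apply chainAux_skip
        intro i hi
        simp only [List.mem_range] at hi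
        omega
      rw [hskip]
      have hhead : chainAux (e :: t) [bRank e] = some e := by
        simp [chainAux]
      rw [hhead]
      cases chainAux t (List.range (bRank e)) <;> simp [Option.or]
    · rw [if_neg hk]
      rw [ih b r]
      rw [chainAux_skip e t (List.range r) (by intro i hi; simp only [List.mem_range] at hi; omega)]

theorem aOuter_eq_chain (fe : List (List (String × String))) :
    aOuter fe ["direct_evidence", "strong_signal", "weak_signal", "contextual_inference"]
      = chainAux fe (List.range 4) := by
  have h0 := aInner_eq_find "direct_evidence" 0 (by simp [bPriority]) fe
  have h1 := aInner_eq_find "strong_signal" 1 (by simp [bPriority]) fe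
  have h2 := aInner_eq_find "weak_signal" 2 (by simp [bPriority]) fe
  have h3 := aInner_eq_find "contextual_inference" 3 (by simp [bPriority]) fe
  have hr : List.range 4 = [0, 1, 2, 3] := by decide
  rw [hr]
  simp only [aOuter, chainAux, h0, h1, h2, h3]

-- ===== VERDICT (by name: the statement is the Claim_ definition above) =====
theorem select_hook_fact_py_spec : Claim_equal_select_hook_fact_py := by
  intro fe _
  unfold Spec_select_hook_fact_py select_hook_fact_py select_hook_fact_py_alt
  by_cases h : fe.isEmpty
  · simp [h]
  · rw [if_neg h, if_neg h]
    rw [aOuter_eq_chain, fold_eq]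
    cases chainAux fe (List.range 4) <;> rfl
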